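-- pv_equiv track=rewrite | github.com/kinger310/learnpy | aoc2018/day08/part1.py | rec
-- ===== SOURCE A (Python) =====
-- def rec(ll):
--     nodes = ll[0]
--     metadata = ll[1]
--     ll = ll[2:]
--
--     if nodes == 0:
--         return ll[metadata:], sum(ll[:metadata])
--
--     li = list()
--     result = 0
--     for n in range(nodes):
--         ll, nli = rec(ll)
--         li.append(nli)
--     for i in range(metadata):
--         if ll[i] <= nodes:
--             result += li[ll[i] - 1]
--     return ll[metadata:], result
-- ===== SOURCE B (Python) =====
-- def rec(ll):
--     # Iterative explicit-stack parser; frame = [children_left, nodes, metadata, child_values]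
--     stack = [[ll[0], ll[0], ll[1], []]]
--     ll = ll[2:]
--     while True:
--         frame = stack[-1]
--         if frame[0] > 0:
--             frame[0] -= 1
--             stack.append([ll[0], ll[0], ll[1], []])
--             ll = ll[2:]
--         else:
--             nodes, metadata, vals = frame[1], frame[2], frame[3]
--             if nodes == 0:
--                 value = sum(ll[:metadata])
--             else:
--                 value = 0
--                 for i in range(metadata):
--                     if ll[i] <= nodes:
--                         value += vals[ll[i] - 1]
--             ll = ll[metadata:]
--             stack.pop()
--             if not stack:
--                 return ll, value
--             stack[-1][3].append(value)
-- ===== Notes on version B (the rewrite author's own statement) =====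
-- stated objective: alternative
-- what changed: A's recursive-descent parser (recursion per node plus a children for-loop) is replaced by an iterative explicit-stack parser: one while loop over frames (children_left, nodes, metadata, child_values) that pushes a frame per header and folds metadata into the parent's value list on pop.
import Mathlib
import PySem

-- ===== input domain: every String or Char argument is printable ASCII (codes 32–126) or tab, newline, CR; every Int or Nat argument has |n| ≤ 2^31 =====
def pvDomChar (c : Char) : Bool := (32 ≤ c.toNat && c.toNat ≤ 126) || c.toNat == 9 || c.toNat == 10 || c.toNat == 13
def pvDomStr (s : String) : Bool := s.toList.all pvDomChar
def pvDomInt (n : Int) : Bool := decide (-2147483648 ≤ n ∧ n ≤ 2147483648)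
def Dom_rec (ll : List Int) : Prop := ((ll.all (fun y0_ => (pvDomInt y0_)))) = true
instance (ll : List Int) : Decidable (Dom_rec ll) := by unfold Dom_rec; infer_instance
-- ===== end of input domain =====

-- B replaces A's recursion by an explicit-stack iterative parser over the same serialized list
-- (objective: alternative decomposition, same asymptotic cost).

-- ===== PORT A =====
-- shared helper: the metadata loop 'for i in range(metadata): if ll[i] <= nodes: result += li[ll[i]-1]'
-- (textually identical in Source A and Source B, so both ports use it)
def pvMetaSum (n m : Int) (ll li : List Int) : Int :=
  (PySem.List.pyRange 0 m 1).foldl (fun acc i =>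
    if PySem.List.pyGetD ll i 0 ≤ n then
      acc + PySem.List.pyGetD li (PySem.List.pyGetD ll i 0 - 1) 0
    else acc) 0

-- A's recursion, with a structural fuel parameter (Python recurses on a list that shrinks by ≥ 2
-- per node, so fuel ll.length + 2 is never exhausted on inputs where Python A returns; see lemmas).
mutual
def recF : Nat → List Int → List Int × Int
  | 0, _ => ([], 0)
  | fuel+1, ll =>
    match ll with
    | n :: m :: rest =>
      if n = 0 then
        (PySem.List.slice rest (some m) none, (PySem.List.slice rest none (some m)).sum)
      else
        let p := childrenF fuel n.toNat rest
        (PySem.List.slice p.1 (some m) none, pvMetaSum n m p.1 p.2)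
    | _ => ([], 0)
def childrenF : Nat → Nat → List Int → List Int × List Int
  | _, 0, ll => (ll, [])
  | 0, _+1, _ => ([], [])
  | fuel+1, k+1, ll =>
    let p := recF fuel ll
    let q := childrenF fuel k p.1
    (q.1, p.2 :: q.2)
end

def rec (ll : List Int) : List Int × Int := recF (ll.length + 2) ll

-- ===== PORT B =====
-- Source B's while-True stack machine; frame = (children_left, nodes, metadata, child_values);
-- the loop runs 2·(node count) − 1 ≤ ll.length iterations, so fuel ll.length + 2 never runs out
-- on inputs where Python B returns.
def loopB : Nat → List Int → List (Int × Int × Int × List Int) → List Int × Int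
  | 0, _, _ => ([], 0)
  | fuel+1, ll, stack =>
    match stack with
    | [] => ([], 0)
    | (cn, n, m, vals) :: st =>
      if 0 < cn then
        loopB fuel (PySem.List.slice ll (some 2) none)
          ((PySem.List.pyGetD ll 0 0, PySem.List.pyGetD ll 0 0, PySem.List.pyGetD ll 1 0,
            ([] : List Int)) :: (cn - 1, n, m, vals) :: st)
      else
        let value := if n = 0 then (PySem.List.slice ll none (some m)).sum
                     else pvMetaSum n m ll vals
        let ll' := PySem.List.slice ll (some m) none
        match st with
        | [] => (ll', value)
        | (cn', n', m', vals') :: st' => loopB fuel ll' ((cn', n', m', vals' ++ [value]) :: st')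

def rec_alt (ll : List Int) : List Int × Int :=
  loopB (ll.length + 2) (PySem.List.slice ll (some 2) none)
    [(PySem.List.pyGetD ll 0 0, PySem.List.pyGetD ll 0 0, PySem.List.pyGetD ll 1 0, [])]

-- ===== PRECONDITION & SPEC =====
-- Pre_rec excludes exactly the inputs on which Python A raises (IndexError on a short list /
-- out-of-range metadata index); the serialized-tree grammar is inherently recursive, so the
-- checker walks the list once (each node consumes ≥ 2 ints, bounding the walk by ll.length + 2).
def pvMetaOk (n m : Int) (ll : List Int) : Bool :=
  decide (m.toNat ≤ ll.length) &&
  (List.range m.toNat).all (fun i =>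
    decide (n < ll.getD i 0) ||
    (decide (-(n.toNat : Int) ≤ ll.getD i 0 - 1) && decide (ll.getD i 0 - 1 < (n.toNat : Int))))

-- chkS fuel k ll: checks that k consecutive well-formed nodes start ll; returns the rest and
-- the total node count on success.
def chkS : Nat → Nat → List Int → Option (List Int × Nat)
  | _, 0, ll => some (ll, 0)
  | 0, _+1, _ => none
  | fuel+1, 1, ll =>
    match ll with
    | n :: m :: rest =>
      if n = 0 then some (PySem.List.slice rest (some m) none, 1)
      else
        match chkS fuel n.toNat rest with
        | none => none
        | some (r, c) =>
          if pvMetaOk n m r then some (PySem.List.slice r (some m) none, c + 1) else none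
    | _ => none
  | fuel+1, k+2, ll =>
    match chkS fuel 1 ll with
    | none => none
    | some (r, c) =>
      match chkS fuel (k+1) r with
      | none => none
      | some (r', c') => some (r', c + c')

def Pre_rec (ll : List Int) : Prop := (chkS (ll.length + 2) 1 ll).isSome = true
instance (ll : List Int) : Decidable (Pre_rec ll) := by unfold Pre_rec; infer_instance

def pvWitness_rec : List Int := [2, 3, 0, 3, 10, 11, 12, 1, 1, 0, 1, 99, 2, 1, 1, 2]

def Spec_rec (ll : List Int) (out : List Int × Int) : Prop := out = rec_alt ll
instance (ll : List Int) (out : List Int × Int) : Decidable (Spec_rec ll out) := by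
  unfold Spec_rec; infer_instance

-- ===== CLAIM (what is proved, stated in full; the proofs are below) =====
def Claim_equal_rec : Prop := ∀ (ll : List Int), Dom_rec ll → Pre_rec ll → Spec_rec ll (rec ll)

-- ===== LEMMAS AND PROOFS =====

lemma pvSliceFromLen (xs : List Int) (a : Int) :
    (PySem.List.slice xs (some a) none).length ≤ xs.length := by
  rw [PySem.List.slice_some_none]
  simp

-- the machine state after a node is finished: pop, handing value v and remainder r to the parent
def popB (k : Nat) (r : List Int) (v : Int) (st : List (Int × Int × Int × List Int)) :
    List Int × Int :=
  match st with
  | [] => (r, v)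
  | (cn, n, m, vals) :: st' => loopB k r ((cn, n, m, vals ++ [v]) :: st')

lemma slice2_cons (n m : Int) (rest : List Int) :
    PySem.List.slice (n :: m :: rest) (some 2) none = rest := by
  simp [pysem]

lemma pyGetD0_cons (n m : Int) (rest : List Int) :
    PySem.List.pyGetD (n :: m :: rest) 0 0 = n := by
  simp [pysem]

lemma pyGetD1_cons (n m : Int) (rest : List Int) :
    PySem.List.pyGetD (n :: m :: rest) 1 0 = m := by
  simp [PySem.List.pyGetD, PySem.List.pyGet?, PySem.List.pyIdx?]

-- one push step of the machine
lemma loopB_push (g : Nat) (ll : List Int) (cn n m : Int) (vals : List Int)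
    (st : List (Int × Int × Int × List Int)) (hcn : 0 < cn) :
    loopB (g+1) ll ((cn, n, m, vals) :: st)
      = loopB g (PySem.List.slice ll (some 2) none)
          ((PySem.List.pyGetD ll 0 0, PySem.List.pyGetD ll 0 0, PySem.List.pyGetD ll 1 0,
            ([] : List Int)) :: (cn - 1, n, m, vals) :: st) := by
  simp only [loopB, if_pos hcn]

-- one finish step of the machine
lemma loopB_finish (k : Nat) (ll : List Int) (cn n m : Int) (vals : List Int)
    (st : List (Int × Int × Int × List Int)) (hcn : ¬ 0 < cn) :
    loopB (k + 1) ll ((cn, n, m, vals) :: st)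
      = popB k (PySem.List.slice ll (some m) none)
          (if n = 0 then (PySem.List.slice ll none (some m)).sum else pvMetaSum n m ll vals) st := by
  cases st with
  | nil => simp only [loopB, popB, if_neg hcn]
  | cons fr st' =>
    obtain ⟨cn', n', m', vals'⟩ := fr
    simp only [loopB, popB, if_neg hcn]

lemma chkS_len : ∀ (F k : Nat) (ll r : List Int) (c : Nat),
    chkS F k ll = some (r, c) → r.length + 2 * c ≤ ll.length ∧ k ≤ c := by
  intro F
  induction F with
  | zero =>
    intro k ll r c h
    match k with
    | 0 =>
      simp only [chkS, Option.some.injEq, Prod.mk.injEq] at h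
      obtain ⟨rfl, rfl⟩ := h
      omega
    | k+1 => simp [chkS] at h
  | succ F ih =>
    intro k ll r c h
    match k with
    | 0 =>
      simp only [chkS, Option.some.injEq, Prod.mk.injEq] at h
      obtain ⟨rfl, rfl⟩ := h
      omega
    | 1 =>
      match ll with
      | [] => simp [chkS] at h
      | [x] => simp [chkS] at h
      | n :: m :: rest =>
        simp only [chkS] at h
        by_cases hn : n = 0
        · rw [if_pos hn] at h
          simp only [Option.some.injEq, Prod.mk.injEq] at h
          obtain ⟨rfl, rfl⟩ := h
          have := pvSliceFromLen rest m
          simp only [List.length_cons]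
          omega
        · rw [if_neg hn] at h
          rcases hc : chkS F n.toNat rest with _ | ⟨r0, c0⟩ <;> rw [hc] at h
          · simp at h
          · dsimp only at h
            by_cases hmo : pvMetaOk n m r0 = true
            · rw [if_pos hmo] at h
              simp only [Option.some.injEq, Prod.mk.injEq] at h
              obtain ⟨rfl, rfl⟩ := h
              have h1 := (ih _ _ _ _ hc).1
              have := pvSliceFromLen r0 m
              simp only [List.length_cons]
              omega
            · rw [if_neg hmo] at h; simp at h
    | k+2 =>
      simp only [chkS] at h
      rcases hc1 : chkS F 1 ll with _ | ⟨r1, c1⟩ <;> rw [hc1] at h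
      · simp at h
      · dsimp only at h
        rcases hc2 : chkS F (k+1) r1 with _ | ⟨r2, c2⟩ <;> rw [hc2] at h
        · simp at h
        · simp only [Option.some.injEq, Prod.mk.injEq] at h
          obtain ⟨rfl, rfl⟩ := h
          have h1 := ih _ _ _ _ hc1
          have h2 := ih _ _ _ _ hc2
          omega

lemma childrenF_zero (f : Nat) (ll : List Int) : childrenF f 0 ll = (ll, []) := by
  cases f <;> rfl

lemma childrenF_one (f : Nat) (ll : List Int) :
    childrenF (f+1) 1 ll
      = ((childrenF f 0 (recF f ll).1).1, (recF f ll).2 :: (childrenF f 0 (recF f ll).1).2) := rfl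

lemma childrenF_succ2 (f k : Nat) (ll : List Int) :
    childrenF (f+1) (k+2) ll
      = ((childrenF f (k+1) (recF f ll).1).1,
         (recF f ll).2 :: (childrenF f (k+1) (recF f ll).1).2) := rfl

lemma recF_eval : ∀ F : Nat,
    (∀ (ll r : List Int) (c : Nat), chkS F 1 ll = some (r, c) →
      ∀ f, 2 * c ≤ f → recF f ll = (r, (recF (2 * c) ll).2)) ∧
    (∀ (j : Nat) (ll r : List Int) (c : Nat), chkS F j ll = some (r, c) →
      ∀ f, 2 * c + 1 ≤ f → childrenF f j ll = (r, (childrenF (2 * c + 1) j ll).2)) := by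
  intro F
  induction F with
  | zero =>
    constructor
    · intro ll r c h; simp [chkS] at h
    · intro j ll r c h f hf
      match j with
      | 0 =>
        simp only [chkS, Option.some.injEq, Prod.mk.injEq] at h
        obtain ⟨rfl, rfl⟩ := h
        simp [childrenF_zero]
      | j+1 => simp [chkS] at h
  | succ F ih =>
    obtain ⟨ih1, ih2⟩ := ih
    have p1 : ∀ (ll r : List Int) (c : Nat), chkS (F+1) 1 ll = some (r, c) →
        ∀ f, 2 * c ≤ f → recF f ll = (r, (recF (2 * c) ll).2) := by
      intro ll r c h f hf
      match ll with
      | [] => simp [chkS] at h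
      | [x] => simp [chkS] at h
      | n :: m :: rest =>
        simp only [chkS] at h
        by_cases hn : n = 0
        · rw [if_pos hn] at h
          simp only [Option.some.injEq, Prod.mk.injEq] at h
          obtain ⟨rfl, rfl⟩ := h
          obtain ⟨f', rfl⟩ : ∃ f', f = f' + 1 := ⟨f - 1, by omega⟩
          subst hn
          have h21 : (2 * 1 : Nat) = 1 + 1 := rfl
          rw [h21]
          simp [recF]
        · rw [if_neg hn] at h
          rcases hc : chkS F n.toNat rest with _ | ⟨r0, c0⟩ <;> rw [hc] at h
          · simp at h
          · dsimp only at h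
            by_cases hmo : pvMetaOk n m r0 = true
            · rw [if_pos hmo] at h
              simp only [Option.some.injEq, Prod.mk.injEq] at h
              obtain ⟨rfl, rfl⟩ := h
              obtain ⟨f', rfl⟩ : ∃ f', f = f' + 1 := ⟨f - 1, by omega⟩
              have hch := ih2 n.toNat rest r0 c0 hc
              have e1 : childrenF f' n.toNat rest
                  = (r0, (childrenF (2*c0+1) n.toNat rest).2) := hch f' (by omega)
              have e2 : childrenF (2*c0+1) n.toNat rest
                  = (r0, (childrenF (2*c0+1) n.toNat rest).2) := hch _ (le_refl _)
              have hrw : 2 * (c0+1) = (2*c0+1) + 1 := by ring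
              rw [hrw]
              simp only [recF, if_neg hn]
              rw [e1, e2]
            · rw [if_neg hmo] at h; simp at h
    refine ⟨p1, ?_⟩
    intro j ll r c h f hf
    match j with
    | 0 =>
      simp only [chkS, Option.some.injEq, Prod.mk.injEq] at h
      obtain ⟨rfl, rfl⟩ := h
      simp [childrenF_zero]
    | 1 =>
      have hc1 := chkS_len (F+1) 1 ll r c h
      obtain ⟨f', rfl⟩ : ∃ f', f = f' + 1 := ⟨f - 1, by omega⟩
      have hp := p1 ll r c h
      have e1 : recF f' ll = (r, (recF (2*c) ll).2) := hp f' (by omega)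
      have e2 : recF (2*c) ll = (r, (recF (2*c) ll).2) := hp _ (le_refl _)
      rw [childrenF_one, childrenF_one, e1, e2]
      simp [childrenF_zero]
    | k+2 =>
      simp only [chkS] at h
      rcases hc1 : chkS F 1 ll with _ | ⟨r1, c1⟩ <;> rw [hc1] at h
      · simp at h
      · dsimp only at h
        rcases hc2 : chkS F (k+1) r1 with _ | ⟨r2, c2⟩ <;> rw [hc2] at h
        · simp at h
        · simp only [Option.some.injEq, Prod.mk.injEq] at h
          obtain ⟨rfl, rfl⟩ := h
          have l1 := chkS_len F 1 ll r1 c1 hc1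
          have l2 := chkS_len F (k+1) r1 r2 c2 hc2
          obtain ⟨f', rfl⟩ : ∃ f', f = f' + 1 := ⟨f - 1, by omega⟩
          have e1 : recF f' ll = (r1, (recF (2*c1) ll).2) :=
            (ih1 ll r1 c1 hc1) f' (by omega)
          have e2 : childrenF f' (k+1) r1 = (r2, (childrenF (2*c2+1) (k+1) r1).2) :=
            (ih2 (k+1) r1 r2 c2 hc2) f' (by omega)
          have e1' : recF (2*(c1+c2)) ll = (r1, (recF (2*c1) ll).2) :=
            (ih1 ll r1 c1 hc1) _ (by omega)
          have e2' : childrenF (2*(c1+c2)) (k+1) r1 = (r2, (childrenF (2*c2+1) (k+1) r1).2) :=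
            (ih2 (k+1) r1 r2 c2 hc2) _ (by omega)
          have hrw : 2 * (c1+c2) + 1 = (2*(c1+c2)) + 1 := rfl
          rw [hrw, childrenF_succ2, childrenF_succ2, e1, e1', e2, e2']

lemma loopB_sim : ∀ F : Nat,
    (∀ (ll r : List Int) (c : Nat), chkS F 1 ll = some (r, c) →
      ∀ st k,
        loopB (2 * c - 1 + k) (PySem.List.slice ll (some 2) none)
          ((PySem.List.pyGetD ll 0 0, PySem.List.pyGetD ll 0 0, PySem.List.pyGetD ll 1 0,
            ([] : List Int)) :: st)
          = popB k r ((recF (2 * c) ll).2) st) ∧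
    (∀ (j : Nat) (ll r : List Int) (c : Nat), chkS F j ll = some (r, c) →
      ∀ (cn n m : Int) (vals : List Int) st k, cn.toNat = j →
        loopB (2 * c + 1 + k) ll ((cn, n, m, vals) :: st)
          = popB k (PySem.List.slice r (some m) none)
              (if n = 0 then (PySem.List.slice r none (some m)).sum
               else pvMetaSum n m r (vals ++ (childrenF (2 * c + 1) j ll).2)) st) := by
  intro F
  induction F with
  | zero =>
    constructor
    · intro ll r c h; simp [chkS] at h
    · intro j ll r c h cn n m vals st k hj
      match j with
      | 0 =>
        simp only [chkS, Option.some.injEq, Prod.mk.injEq] at h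
        obtain ⟨rfl, rfl⟩ := h
        have hcn : ¬ 0 < cn := by omega
        have hf : 2*0+1+k = k+1 := by omega
        rw [hf, loopB_finish k ll cn n m vals st hcn, childrenF_zero]
        simp
      | j+1 => simp [chkS] at h
  | succ F ih =>
    obtain ⟨ih1, ih2⟩ := ih
    have p1 : ∀ (ll r : List Int) (c : Nat), chkS (F+1) 1 ll = some (r, c) →
        ∀ st k,
          loopB (2 * c - 1 + k) (PySem.List.slice ll (some 2) none)
            ((PySem.List.pyGetD ll 0 0, PySem.List.pyGetD ll 0 0, PySem.List.pyGetD ll 1 0,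
              ([] : List Int)) :: st)
            = popB k r ((recF (2 * c) ll).2) st := by
      intro ll r c h st k
      match ll with
      | [] => simp [chkS] at h
      | [x] => simp [chkS] at h
      | n :: m :: rest =>
        rw [slice2_cons, pyGetD0_cons, pyGetD1_cons]
        simp only [chkS] at h
        by_cases hn : n = 0
        · rw [if_pos hn] at h
          simp only [Option.some.injEq, Prod.mk.injEq] at h
          obtain ⟨rfl, rfl⟩ := h
          subst hn
          have hf : 2*1-1+k = k+1 := by omega
          rw [hf, loopB_finish k rest 0 0 m [] st (by omega)]
          have h21 : (2*1 : Nat) = 1+1 := rfl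
          rw [h21]
          simp [recF]
        · rw [if_neg hn] at h
          rcases hc : chkS F n.toNat rest with _ | ⟨r0, c0⟩ <;> rw [hc] at h
          · simp at h
          · dsimp only at h
            by_cases hmo : pvMetaOk n m r0 = true
            · rw [if_pos hmo] at h
              simp only [Option.some.injEq, Prod.mk.injEq] at h
              obtain ⟨rfl, rfl⟩ := h
              have hf : 2*(c0+1)-1+k = 2*c0+1+k := by omega
              rw [hf, ih2 n.toNat rest r0 c0 hc n n m [] st k rfl]
              rw [if_neg hn]
              have hrw : 2*(c0+1) = (2*c0+1)+1 := by ring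
              rw [hrw]
              simp only [recF, if_neg hn]
              have e2 : childrenF (2*c0+1) n.toNat rest
                  = (r0, (childrenF (2*c0+1) n.toNat rest).2) :=
                ((recF_eval F).2) n.toNat rest r0 c0 hc _ (le_refl _)
              rw [e2]
              simp
            · rw [if_neg hmo] at h; simp at h
    refine ⟨p1, ?_⟩
    intro j ll r c h cn n m vals st k hj
    match j with
    | 0 =>
      simp only [chkS, Option.some.injEq, Prod.mk.injEq] at h
      obtain ⟨rfl, rfl⟩ := h
      have hcn : ¬ 0 < cn := by omega
      have hf : 2*0+1+k = k+1 := by omega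
      rw [hf, loopB_finish k ll cn n m vals st hcn, childrenF_zero]
      simp
    | 1 =>
      have hcn : cn = 1 := by omega
      subst hcn
      have hl := chkS_len (F+1) 1 ll r c h
      obtain ⟨g, hg⟩ : ∃ g, 2*c+1+k = g+1 := ⟨2*c+k, by omega⟩
      rw [hg, loopB_push g ll 1 n m vals st (by omega)]
      have hg2 : g = 2*c-1+(k+1) := by omega
      have hcn1 : (1:Int) - 1 = 0 := by omega
      rw [hg2, hcn1, p1 ll r c h _ (k+1)]
      simp only [popB]
      rw [loopB_finish k r 0 n m (vals ++ [(recF (2*c) ll).2]) st (by omega)]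
      rw [childrenF_one, childrenF_zero]
      simp only [popB]
    | k'+2 =>
      have hcnpos : (0:Int) < cn := by omega
      simp only [chkS] at h
      rcases hc1 : chkS F 1 ll with _ | ⟨r1, c1⟩ <;> rw [hc1] at h
      · simp at h
      · dsimp only at h
        rcases hc2 : chkS F (k'+1) r1 with _ | ⟨r2, c2⟩ <;> rw [hc2] at h
        · simp at h
        · simp only [Option.some.injEq, Prod.mk.injEq] at h
          obtain ⟨rfl, rfl⟩ := h
          have l1 := chkS_len F 1 ll r1 c1 hc1
          have l2 := chkS_len F (k'+1) r1 r2 c2 hc2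
          obtain ⟨g, hg⟩ : ∃ g, 2*(c1+c2)+1+k = g+1 := ⟨2*(c1+c2)+k, by omega⟩
          rw [hg, loopB_push g ll cn n m vals st hcnpos]
          have hg2 : g = 2*c1-1+(2*c2+1+k) := by omega
          rw [hg2, ih1 ll r1 c1 hc1 ((cn-1, n, m, vals)::st) (2*c2+1+k)]
          simp only [popB]
          rw [ih2 (k'+1) r1 r2 c2 hc2 (cn-1) n m (vals ++ [(recF (2*c1) ll).2]) st k (by omega)]
          have hrw : 2*(c1+c2)+1 = (2*(c1+c2))+1 := rfl
          rw [hrw, childrenF_succ2]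
          have e1' : recF (2*(c1+c2)) ll = (r1, (recF (2*c1) ll).2) :=
            ((recF_eval F).1) ll r1 c1 hc1 _ (by omega)
          have e2' : childrenF (2*(c1+c2)) (k'+1) r1
              = (r2, (childrenF (2*c2+1) (k'+1) r1).2) :=
            ((recF_eval F).2) (k'+1) r1 r2 c2 hc2 _ (by omega)
          rw [e1', e2']
          have hap : (vals ++ [(recF (2*c1) ll).2]) ++ (childrenF (2*c2+1) (k'+1) r1).2
              = vals ++ ((recF (2*c1) ll).2 :: (childrenF (2*c2+1) (k'+1) r1).2) := by
            simp
          rw [hap]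
          dsimp only
          simp only [popB]

-- ===== VERDICT (by name: the statement is the Claim_ definition above) =====
theorem rec_spec : Claim_equal_rec := by
  unfold Claim_equal_rec
  intro ll hdom hpre
  unfold Spec_rec
  unfold Pre_rec at hpre
  rcases hs : chkS (ll.length + 2) 1 ll with _ | ⟨r, c⟩
  · rw [hs] at hpre; simp at hpre
  · have hl := chkS_len _ _ _ _ _ hs
    have e1 : recF (ll.length + 2) ll = (r, (recF (2*c) ll).2) :=
      ((recF_eval (ll.length+2)).1) ll r c hs _ (by omega)
    have e2 := ((loopB_sim (ll.length+2)).1) ll r c hs [] (ll.length + 3 - 2*c)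
    have hf : 2*c - 1 + (ll.length + 3 - 2*c) = ll.length + 2 := by omega
    rw [hf] at e2
    unfold rec rec_alt
    rw [e1, e2]
    rfl
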